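-- pv_equiv track=rewrite | github.com/jenlcmc/graphrag_tax | evaluation/run_eval.py | _sara_ref_matches_section
-- ===== SOURCE A (Python) =====
-- def _sara_ref_matches_section(section_id: str, allowed_refs: list[str]) -> bool:
--     sid = (section_id or "").strip().lower()
--     if not sid or not allowed_refs:
--         return False
--     for ref in allowed_refs:
--         canonical = str(ref or "").strip().lower()
--         if not canonical:
--             continue
--         if sid == canonical or sid.startswith(canonical + "("):
--             return True
--     return False
-- ===== SOURCE B (Python) =====
-- def _sara_ref_matches_section(section_id: str, allowed_refs: list[str]) -> bool:
--     sid = (section_id or "").strip().lower()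
--     if not sid or not allowed_refs:
--         return False
--     refs = {c for c in (str(r or "").strip().lower() for r in allowed_refs) if c}
--     if sid in refs:
--         return True
--     return any(sid[:i] in refs for i, ch in enumerate(sid) if ch == '(')
-- ===== Notes on version B (the rewrite author's own statement) =====
-- stated objective: alternative
-- what changed: B builds a set of normalized non-empty refs once, then answers by membership of sid and of sid's prefixes at each '(' position, replacing A's per-ref equality/startswith scan.
import Mathlib
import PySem

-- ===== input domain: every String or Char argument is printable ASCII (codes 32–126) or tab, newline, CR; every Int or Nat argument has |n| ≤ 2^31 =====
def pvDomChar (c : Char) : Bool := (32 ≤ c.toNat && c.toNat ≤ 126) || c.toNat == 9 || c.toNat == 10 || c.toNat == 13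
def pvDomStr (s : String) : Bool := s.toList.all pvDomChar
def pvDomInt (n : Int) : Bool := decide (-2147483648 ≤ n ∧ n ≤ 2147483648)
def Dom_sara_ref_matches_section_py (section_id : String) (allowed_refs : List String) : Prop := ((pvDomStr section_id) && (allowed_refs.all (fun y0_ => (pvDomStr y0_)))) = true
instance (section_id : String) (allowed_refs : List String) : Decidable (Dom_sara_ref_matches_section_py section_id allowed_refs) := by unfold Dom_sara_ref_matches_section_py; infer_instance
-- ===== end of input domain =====

-- B replaces A's per-ref linear equality/startswith scan by a set of normalized refs
-- queried at sid and at each '(' boundary of sid (objective: alternative decomposition).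

-- ===== PORT A =====
-- the loop 'for ref in allowed_refs: …'
def pvALoop (sid : String) : List String → Bool
  | [] => false
  | ref :: rest =>
    let canonical := PySem.Str.lower (PySem.Str.strip ref)
    if canonical == "" then pvALoop sid rest
    else if sid == canonical || PySem.Str.startswith sid (canonical ++ "(") then true
    else pvALoop sid rest

def sara_ref_matches_section_py (section_id : String) (allowed_refs : List String) : Bool :=
  let sid := PySem.Str.lower (PySem.Str.strip section_id)
  if sid == "" || allowed_refs.isEmpty then false
  else pvALoop sid allowed_refs

-- ===== PORT B =====
-- str(r or "").strip().lower()
def pvBNorm (r : String) : String := PySem.Str.lower (PySem.Str.strip r)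

def sara_ref_matches_section_py_alt (section_id : String) (allowed_refs : List String) : Bool :=
  let sid := pvBNorm section_id
  if sid == "" || allowed_refs.isEmpty then false
  else
    -- refs = {c for c in (str(r or "").strip().lower() for r in allowed_refs) if c}
    let refs : PySem.Set String :=
      PySem.Set.ofList ((allowed_refs.map pvBNorm).filter (fun c => !(c == "")))
    if PySem.Set.contains refs sid then true
    else
      -- any(sid[:i] in refs for i, ch in enumerate(sid) if ch == '(')
      (PySem.List.enumerate sid.toList).any
        (fun p => p.2 == '(' && PySem.Set.contains refs (String.ofList (PySem.List.slice sid.toList none (some p.1))))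

-- ===== PRECONDITION & SPEC =====
def Spec_sara_ref_matches_section_py (section_id : String) (allowed_refs : List String) (out : Bool) : Prop := out = sara_ref_matches_section_py_alt section_id allowed_refs
instance (section_id : String) (allowed_refs : List String) (out : Bool) : Decidable (Spec_sara_ref_matches_section_py section_id allowed_refs out) := by unfold Spec_sara_ref_matches_section_py; infer_instance

-- ===== CLAIM (what is proved, stated in full; the proofs are below) =====
def Claim_equal_sara_ref_matches_section_py : Prop := ∀ (section_id : String) (allowed_refs : List String), Dom_sara_ref_matches_section_py section_id allowed_refs → Spec_sara_ref_matches_section_py section_id allowed_refs (sara_ref_matches_section_py section_id allowed_refs)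

-- ===== LEMMAS AND PROOFS =====

-- A's loop is an existential over the ref list
theorem pvALoop_iff (sid : String) (l : List String) :
    pvALoop sid l = true ↔
      ∃ ref ∈ l, pvBNorm ref ≠ "" ∧
        (sid = pvBNorm ref ∨ PySem.Str.startswith sid (pvBNorm ref ++ "(") = true) := by
  induction l with
  | nil => simp [pvALoop]
  | cons ref rest ih =>
    simp only [pvALoop, pvBNorm]
    split_ifs with h1 h2
    · simp only [List.mem_cons]
      constructor
      · intro h; rcases ih.mp h with ⟨r, hr, h⟩; exact ⟨r, Or.inr hr, h⟩
      · rintro ⟨r, (rfl | hr), h⟩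
        · exact absurd (by simpa using h1) h.1
        · exact ih.mpr ⟨r, hr, h⟩
    · constructor
      · intro _
        refine ⟨ref, List.mem_cons_self .., by simpa using h1, ?_⟩
        rcases Bool.or_eq_true_iff.mp h2 with h | h
        · exact Or.inl (by simpa using h)
        · exact Or.inr h
      · intro _; rfl
    · simp only [List.mem_cons]
      constructor
      · intro h; rcases ih.mp h with ⟨r, hr, h⟩; exact ⟨r, Or.inr hr, h⟩
      · rintro ⟨r, (rfl | hr), h⟩
        · refine absurd ?_ h2
          rw [Bool.or_eq_true]
          rcases h.2 with h' | h'
          · exact Or.inl (by simp [h'])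
          · exact Or.inr h'
        · exact ih.mpr ⟨r, hr, h⟩

-- membership in B's set of normalized refs
theorem pvMemRefs (l : List String) (c : String) :
    PySem.Set.contains
        (PySem.Set.ofList ((l.map pvBNorm).filter (fun c => !(c == "")))) c = true ↔
      (∃ ref ∈ l, pvBNorm ref = c) ∧ c ≠ "" := by
  simp only [PySem.Set.contains_iff, PySem.Set.mem_ofList, List.mem_filter, List.mem_map]
  constructor
  · rintro ⟨⟨r, hr, rfl⟩, hne⟩
    exact ⟨⟨r, hr, rfl⟩, by simpa using hne⟩
  · rintro ⟨⟨r, hr, rfl⟩, hne⟩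
    exact ⟨⟨r, hr, rfl⟩, by simpa using hne⟩

-- startswith (c ++ "(") characterized by a '(' boundary position
theorem pvStartswithParen (sid c : String) :
    PySem.Str.startswith sid (c ++ "(") = true ↔
      ∃ i : Nat, sid.toList[i]? = some '(' ∧ sid.toList.take i = c.toList := by
  rw [show PySem.Str.startswith sid (c ++ "(") =
        PySem.Chars.startswith sid.toList (c.toList ++ ['(']) by simp,
      PySem.Chars.startswith_iff]
  constructor
  · rintro ⟨t, ht⟩
    refine ⟨c.toList.length, ?_, ?_⟩
    · rw [← ht, List.append_assoc]
      simp
    · rw [← ht, List.append_assoc, List.take_left]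
  · rintro ⟨i, hget, htake⟩
    obtain ⟨hi, hgi⟩ := List.getElem?_eq_some_iff.mp hget
    have hlen : c.toList.length = i := by
      have h' := congrArg List.length htake
      simp only [List.length_take] at h'
      omega
    rw [List.prefix_iff_eq_take]
    have hl2 : (c.toList ++ ['(']).length = i + 1 := by simp [hlen]
    rw [hl2, List.take_add_one, htake, hget]
    simp

-- sid[:i] as a take, for the natural indices enumerate produces
theorem pvSlice_take (xs : List Char) (i : Nat) :
    PySem.List.slice xs none (some (i : Int)) = xs.take i := by
  simp [PySem.List.slice_to_natCast]

theorem sara_ref_matches_section_py_spec_aux (section_id : String) (allowed_refs : List String) :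
    sara_ref_matches_section_py section_id allowed_refs =
      sara_ref_matches_section_py_alt section_id allowed_refs := by
  unfold sara_ref_matches_section_py sara_ref_matches_section_py_alt
  simp only []
  by_cases hguard : (PySem.Str.lower (PySem.Str.strip section_id) == "" || allowed_refs.isEmpty) = true
  · rw [pvBNorm] at *; rw [if_pos hguard, if_pos hguard]
  · rw [pvBNorm] at *
    rw [if_neg hguard, if_neg hguard]
    set sid := PySem.Str.lower (PySem.Str.strip section_id) with hsid
    by_cases hmem : PySem.Set.contains
        (PySem.Set.ofList ((allowed_refs.map pvBNorm).filter (fun c => !(c == "")))) sid = true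
    · rw [if_pos hmem]
      rcases (pvMemRefs _ _).mp hmem with ⟨⟨r, hr, hrn⟩, hne⟩
      exact (pvALoop_iff _ _).mpr ⟨r, hr, by rw [hrn]; exact hne, Or.inl hrn.symm⟩
    · rw [if_neg hmem]
      rw [Bool.eq_iff_iff, pvALoop_iff, List.any_eq_true]
      constructor
      · rintro ⟨r, hr, hne, hcase⟩
        rcases hcase with hcase | hcase
        · exact absurd ((pvMemRefs _ _).mpr ⟨⟨r, hr, hcase.symm⟩, hcase ▸ hne⟩) hmem
        · rcases (pvStartswithParen _ _).mp hcase with ⟨i, hget, htake⟩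
          obtain ⟨hi, hgi⟩ := List.getElem?_eq_some_iff.mp hget
          refine ⟨((i : Int), '('), ?_, ?_⟩
          · rw [PySem.List.mem_enumerate_iff]
            exact ⟨i, hi, by simp [hgi]⟩
          · simp only [pvSlice_take, htake]
            rw [Bool.and_eq_true]
            refine ⟨by simp, ?_⟩
            rw [String.ofList_toList]
            exact (pvMemRefs _ _).mpr ⟨⟨r, hr, rfl⟩, hne⟩
      · rintro ⟨⟨ii, ch⟩, hmem', hp⟩
        rw [PySem.List.mem_enumerate_iff] at hmem'
        rcases hmem' with ⟨k, hk, heq⟩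
        rw [Bool.and_eq_true] at hp
        obtain ⟨hch, hin⟩ := hp
        have h1 : ii = (k : Int) := by simpa using congrArg Prod.fst heq
        have h2 : ch = sid.toList[k] := by simpa using congrArg Prod.snd heq
        rw [h1, pvSlice_take] at hin
        rcases (pvMemRefs _ _).mp hin with ⟨⟨r, hr, hrn⟩, hne⟩
        refine ⟨r, hr, by rw [hrn]; exact hne, Or.inr ?_⟩
        apply (pvStartswithParen _ _).mpr
        refine ⟨k, ?_, ?_⟩
        · rw [List.getElem?_eq_getElem hk, ← h2]
          simpa using hch
        · rw [hrn, String.toList_ofList]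

-- ===== VERDICT (by name: the statement is the Claim_ definition above) =====
theorem sara_ref_matches_section_py_spec : Claim_equal_sara_ref_matches_section_py := by
  intro section_id allowed_refs _
  unfold Spec_sara_ref_matches_section_py
  exact sara_ref_matches_section_py_spec_aux section_id allowed_refs
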